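-- pv_equiv track=rewrite | github.com/Pauloswimming/python_Aprendizado- | treino2.py | processaValor1
-- ===== SOURCE A (Python) =====
-- def processaValor1(entrada):
--     nova_entrada = []
--     i = 0
--     seq = ''
--     while i < len(entrada):
--         if entrada[i] != '0':
--             seq += entrada[i]
--         else:
--             if seq != '':
--                 nova_entrada.append(seq)
--                 seq = ''
--         i += 1
--     if seq != '':
--         nova_entrada.append(seq)
--     return nova_entrada
-- ===== SOURCE B (Python) =====
-- def processaValor1(entrada):
--     # Split on '0' and keep the non-empty pieces.
--     return [s for s in entrada.split('0') if s]
-- ===== Notes on version B (the rewrite author's own statement) =====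
-- stated objective: idiomatic
-- what changed: Replaces the manual index loop with per-character string accumulator (quadratic seq += c concatenation) by a single str.split('0') call followed by filtering out the empty pieces.
import Mathlib
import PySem

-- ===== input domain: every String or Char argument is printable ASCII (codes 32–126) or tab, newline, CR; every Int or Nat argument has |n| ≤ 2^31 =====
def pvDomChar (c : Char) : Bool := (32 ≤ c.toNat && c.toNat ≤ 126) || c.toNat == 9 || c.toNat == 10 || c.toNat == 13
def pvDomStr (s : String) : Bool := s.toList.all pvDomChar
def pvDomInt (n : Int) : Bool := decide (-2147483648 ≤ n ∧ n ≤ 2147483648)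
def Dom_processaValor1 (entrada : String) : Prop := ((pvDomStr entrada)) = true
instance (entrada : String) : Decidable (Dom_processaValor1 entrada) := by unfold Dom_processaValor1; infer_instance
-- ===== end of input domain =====

-- B replaces A's index loop and manual accumulator by split('0') + filtering empties (idiomatic).


-- ===== PORT A =====
-- the while loop over the indices becomes a fold over the characters with the same
-- (nova_entrada, seq) state; the trailing 'if seq != ""' stays after the loop
def processaValor1 (entrada : String) : List String :=
  let st := entrada.toList.foldl
    (fun (st : List String × String) c =>
      if c ≠ '0' then (st.1, st.2.push c)
      else if st.2 ≠ "" then (st.1 ++ [st.2], "") else st)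
    ([], "")
  if st.2 ≠ "" then st.1 ++ [st.2] else st.1

-- ===== PORT B =====
-- entrada.split('0') → PySem.Chars.splitOn (sep ≠ ""); keep the non-empty pieces
def processaValor1_alt (entrada : String) : List String :=
  ((PySem.Chars.splitOn entrada.toList ['0']).map String.ofList).filter (fun s => s ≠ "")

-- ===== PRECONDITION & SPEC =====
def Spec_processaValor1 (entrada : String) (out : List String) : Prop := out = processaValor1_alt entrada
instance (entrada : String) (out : List String) : Decidable (Spec_processaValor1 entrada out) := by unfold Spec_processaValor1; infer_instance

-- ===== CLAIM (what is proved, stated in full; the proofs are below) =====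
def Claim_equal_processaValor1 : Prop := ∀ (entrada : String), Dom_processaValor1 entrada → Spec_processaValor1 entrada (processaValor1 entrada)

-- ===== LEMMAS AND PROOFS =====

/-- the pure single-char split on '0' -/
def splitChar : List Char → List (List Char)
  | [] => [[]]
  | c :: rest =>
    if c = '0' then [] :: splitChar rest
    else (c :: (splitChar rest).headI) :: (splitChar rest).tail

theorem splitChar_ne_nil (l : List Char) : splitChar l ≠ [] := by
  cases l with
  | nil => simp [splitChar]
  | cons c rest => simp only [splitChar]; split <;> simp

theorem go_eq (fuel : Nat) (l cur : List Char) (acc : List (List Char))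
    (h : l.length ≤ fuel) :
    PySem.Chars.splitOn.go ['0'] fuel l cur acc =
      acc.reverse ++ (cur.reverse ++ (splitChar l).headI) :: (splitChar l).tail := by
  induction fuel generalizing l cur acc with
  | zero =>
    interval_cases hl : l.length
    obtain rfl : l = [] := List.length_eq_zero_iff.mp hl
    simp [PySem.Chars.splitOn.go, splitChar]
  | succ fuel ih =>
    cases l with
    | nil => simp [PySem.Chars.splitOn.go, splitChar]
    | cons c rest =>
      by_cases hc : c = '0'
      · subst hc
        rw [show PySem.Chars.splitOn.go ['0'] (fuel+1) ('0' :: rest) cur acc =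
              PySem.Chars.splitOn.go ['0'] fuel (List.drop 1 ('0' :: rest)) [] (cur.reverse :: acc) by
            simp [PySem.Chars.splitOn.go, List.isPrefixOf]]
        rw [ih _ _ _ (by simpa using Nat.le_of_succ_le_succ (by simpa using h))]
        cases hs : splitChar rest with
        | nil => exact absurd hs (splitChar_ne_nil rest)
        | cons a t => simp [splitChar, hs]
      · rw [show PySem.Chars.splitOn.go ['0'] (fuel+1) (c :: rest) cur acc =
              PySem.Chars.splitOn.go ['0'] fuel rest (c :: cur) acc by
            simp [PySem.Chars.splitOn.go, List.isPrefixOf, Ne.symm hc]]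
        rw [ih _ _ _ (Nat.le_of_succ_le_succ (by simpa using h))]
        simp [splitChar, hc]

theorem splitOn_eq_splitChar (l : List Char) :
    PySem.Chars.splitOn l ['0'] = splitChar l := by
  unfold PySem.Chars.splitOn
  rw [go_eq _ _ _ _ (Nat.le_succ_of_le le_rfl)]
  cases hs : splitChar l with
  | nil => exact absurd hs (splitChar_ne_nil l)
  | cons a t => simp

/-- B's value expressed over splitChar, with a pending prefix `s` on the first piece -/
def gg (l : List Char) (s : List Char) : List (List Char) :=
  ((s ++ (splitChar l).headI) :: (splitChar l).tail).filter (fun x => x ≠ [])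

theorem ne_empty_iff (s : String) : (s ≠ "") ↔ s.toList ≠ [] := by
  constructor
  · intro h h'
    exact h (by rw [← String.ofList_toList (s := s), h'])
  · intro h h'
    exact h (by simp [h'])

theorem loopA (l : List Char) (nova : List String) (seq : String) :
    (let st := l.foldl
        (fun (st : List String × String) c =>
          if c ≠ '0' then (st.1, st.2.push c)
          else if st.2 ≠ "" then (st.1 ++ [st.2], "") else st)
        (nova, seq)
      if st.2 ≠ "" then st.1 ++ [st.2] else st.1)
    = nova ++ (gg l seq.toList).map String.ofList := by
  induction l generalizing nova seq with
  | nil =>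
    by_cases h : seq = ""
    · subst h; simp [gg, splitChar]
    · have h' : seq.toList ≠ [] := (ne_empty_iff seq).mp h
      simp [gg, splitChar, h, h']
  | cons c rest ih =>
    by_cases hc : c = '0'
    · subst hc
      by_cases h : seq = ""
      · subst h
        simp only [List.foldl_cons]
        rw [if_neg (show ¬(('0':Char) ≠ '0') by decide),
            if_neg (show ¬(("":String) ≠ "") by decide), ih]
        cases hs : splitChar rest with
        | nil => exact absurd hs (splitChar_ne_nil rest)
        | cons a t => simp [gg, splitChar, hs]
      · have h' : seq.toList ≠ [] := (ne_empty_iff seq).mp h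
        simp only [List.foldl_cons]
        rw [if_neg (show ¬(('0':Char) ≠ '0') by decide), if_pos h, ih]
        cases hs : splitChar rest with
        | nil => exact absurd hs (splitChar_ne_nil rest)
        | cons a t =>
          simp [gg, splitChar, hs, h', String.ofList_toList]
    · simp only [List.foldl_cons, if_pos (by simpa using hc)]
      rw [ih]
      cases hs : splitChar rest with
      | nil => exact absurd hs (splitChar_ne_nil rest)
      | cons a t => simp [gg, splitChar, hs, hc]

theorem alt_eq_gg (entrada : String) :
    processaValor1_alt entrada = (gg entrada.toList []).map String.ofList := by
  unfold processaValor1_alt gg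
  rw [splitOn_eq_splitChar]
  cases hs : splitChar entrada.toList with
  | nil => exact absurd hs (splitChar_ne_nil entrada.toList)
  | cons a t =>
    simp only [List.nil_append]
    rw [List.filter_map]
    congr 1
    apply List.filter_congr
    intro x _
    simp [Function.comp]

-- ===== VERDICT (by name: the statement is the Claim_ definition above) =====
theorem processaValor1_spec : Claim_equal_processaValor1 := by
  intro entrada _
  unfold Spec_processaValor1 processaValor1
  rw [alt_eq_gg]
  simpa using loopA entrada.toList [] ""
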